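-- pv_equiv track=rewrite | github.com/Kawser-nerd/CLCDSA | Source Codes/AtCoder/arc087/B/1883021.py | solve
-- ===== SOURCE A (Python) =====
-- def solve(s, x, y):
--     def update(move):
--         ncx = set()
--         cx = cxy[is_x]
--         for x in cx:
--             ncx.add(x + move)
--             ncx.add(x - move)
--         cxy[is_x] = ncx
--
--     spl = map(len, s.split('T'))
--     is_x = 1
--     cxy = [{next(spl)}, {0}]
--     for l in spl:
--         update(l)
--         is_x ^= 1
--
--     return x in cxy[0] and y in cxy[1]
-- ===== SOURCE B (Python) =====
-- def solve(s, x, y):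
--     # Reduce each axis to a SUBSET-SUM check: a signed sum over run lengths
--     # hits t iff some subset sums to (t + S) / 2, decided by a boolean table.
--     runs = [len(p) for p in s.split('T')]
--
--     def reachable(vals, target):
--         S = sum(vals)
--         t = target + S
--         if t < 0 or t > 2 * S or t % 2:
--             return False
--         half = t // 2
--         dp = [True] + [False] * half
--         for v in vals:
--             dp = [dp[j] or (j >= v and dp[j - v]) for j in range(half + 1)]
--         return dp[half]
--
--     return reachable(runs[2::2], x - runs[0]) and reachable(runs[1::2], y)
-- ===== Notes on version B (the rewrite author's own statement) =====
-- stated objective: alternative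
-- what changed: Replaces A's alternating-axis BFS over sets of reachable offsets with a reduction of each axis to subset-sum (signed sum hits t iff a subset sums to (t+S)/2), decided by a target-bounded boolean DP table after parity/range short-circuits; the runs are split per axis up front by step-2 slices instead of toggling inside one loop.
import Mathlib
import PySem

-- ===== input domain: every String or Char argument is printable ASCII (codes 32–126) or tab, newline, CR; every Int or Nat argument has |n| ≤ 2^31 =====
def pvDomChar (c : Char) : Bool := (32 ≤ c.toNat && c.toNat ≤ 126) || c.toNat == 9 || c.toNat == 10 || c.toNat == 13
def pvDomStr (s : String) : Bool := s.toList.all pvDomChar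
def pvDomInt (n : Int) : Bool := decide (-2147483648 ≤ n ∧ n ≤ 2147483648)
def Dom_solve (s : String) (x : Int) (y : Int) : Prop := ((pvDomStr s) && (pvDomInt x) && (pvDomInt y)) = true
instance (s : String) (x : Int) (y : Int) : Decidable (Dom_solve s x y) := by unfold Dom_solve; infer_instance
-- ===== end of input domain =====

-- B replaces A's alternating-axis BFS over sets of offsets by a per-axis
-- subset-sum reduction decided with a boolean DP table (objective: alternative).

-- ===== PORT A =====

-- lengths of the 'T'-separated segments (map(len, s.split('T')) in both Pythons)
def runsOf (s : String) : List Nat :=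
  (PySem.Chars.splitOn s.toList ['T']).map List.length

-- the inner 'update' closure of A: {v + move, v - move : v in cx}
def updateA (cx : PySem.Set Int) (move : Int) : PySem.Set Int :=
  cx.foldl (fun ncx v => PySem.Set.add (PySem.Set.add ncx (v + move)) (v - move)) PySem.Set.empty

-- the 'for l in spl: update(l); is_x ^= 1' loop (is_x = true ↔ 1: update cxy[1])
def loopA : List Nat → Bool → PySem.Set Int × PySem.Set Int → PySem.Set Int × PySem.Set Int
  | [], _, cxy => cxy
  | l :: rest, isx, (c0, c1) =>
      if isx then loopA rest false (c0, updateA c1 (l : Int))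
      else loopA rest true (updateA c0 (l : Int), c1)

def solve (s : String) (x : Int) (y : Int) : Bool :=
  match runsOf s with
  | [] => false      -- unreachable: str.split never returns an empty list
  | f :: rest =>
      let cxy := loopA rest true
        (PySem.Set.add PySem.Set.empty (f : Int), PySem.Set.add PySem.Set.empty 0)
      PySem.Set.contains cxy.1 x && PySem.Set.contains cxy.2 y

-- ===== PORT B =====

-- Source B's step-2 slice runs[a::2] (applied after dropping the first a elements);
-- exact for Python's list[a::2] with 0 ≤ a
def stride2 : List Nat → List Nat
  | [] => []
  | [a] => [a]
  | a :: _ :: t => a :: stride2 t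

-- Source B's 'dp = [dp[j] or (j >= v and dp[j - v]) for j in range(half + 1)]'
def dpStep (dp : List Bool) (v : Nat) (half : Nat) : List Bool :=
  (List.range (half + 1)).map
    (fun j => dp.getD j false || (decide (v ≤ j) && dp.getD (j - v) false))

-- Source B's 'reachable(vals, target)'
def reachable (vals : List Nat) (target : Int) : Bool :=
  let S : Nat := vals.sum
  let t : Int := target + S
  if t < 0 ∨ t > 2 * (S : Int) ∨ PySem.Int.mod t 2 ≠ 0 then false
  else
    let half : Nat := (PySem.Int.floordiv t 2).toNat
    let dp := vals.foldl (fun dp v => dpStep dp v half) (true :: List.replicate half false)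
    dp.getD half false

def solve_alt (s : String) (x : Int) (y : Int) : Bool :=
  match runsOf s with
  | [] => false      -- unreachable: str.split never returns an empty list
  | f :: rest =>
      reachable (stride2 (rest.drop 1)) (x - f) && reachable (stride2 rest) y

-- ===== PRECONDITION & SPEC =====
def Spec_solve (s : String) (x : Int) (y : Int) (out : Bool) : Prop := out = solve_alt s x y
instance (s : String) (x : Int) (y : Int) (out : Bool) : Decidable (Spec_solve s x y out) := by unfold Spec_solve; infer_instance

-- ===== CLAIM (what is proved, stated in full; the proofs are below) =====
def Claim_equal_solve : Prop := ∀ (s : String) (x : Int) (y : Int), Dom_solve s x y → Spec_solve s x y (solve s x y)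

-- ===== LEMMAS AND PROOFS =====

-- w reachable from v by adding ± each element of the list, in order
def SR : List Nat → Int → Int → Prop
  | [], v, w => w = v
  | l :: t, v, w => SR t (v + l) w ∨ SR t (v - l) w

-- subset-sum: some subset of the list sums to n
def SubS : List Nat → Nat → Prop
  | [], n => n = 0
  | v :: t, n => SubS t n ∨ (v ≤ n ∧ SubS t (n - v))

theorem mem_updateA_foldl (l : Int) (lst : List Int) (acc : PySem.Set Int) (w : Int) :
    w ∈ lst.foldl (fun ncx v => PySem.Set.add (PySem.Set.add ncx (v + l)) (v - l)) acc ↔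
      w ∈ acc ∨ ∃ v ∈ lst, w = v + l ∨ w = v - l := by
  induction lst generalizing acc with
  | nil => simp
  | cons a t ih =>
      simp only [List.foldl_cons, ih, PySem.Set.mem_add, List.mem_cons]
      aesop

theorem mem_updateA (c : PySem.Set Int) (l w : Int) :
    w ∈ updateA c l ↔ ∃ v ∈ c, w = v + l ∨ w = v - l := by
  unfold updateA
  rw [mem_updateA_foldl]
  simp [PySem.Set.empty]

-- the fold of updateA over a list of moves
def foldU (c : PySem.Set Int) (vals : List Nat) : PySem.Set Int :=
  vals.foldl (fun c l => updateA c (l : Int)) c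

-- folding updateA over a list of moves reaches exactly the signed sums
theorem mem_foldU (vals : List Nat) (c : PySem.Set Int) (w : Int) :
    w ∈ foldU c vals ↔ ∃ v ∈ c, SR vals v w := by
  induction vals generalizing c with
  | nil => simp [foldU, SR]
  | cons l t ih =>
      show w ∈ foldU (updateA c (l : Int)) t ↔ _
      rw [ih]
      simp only [mem_updateA, SR]
      constructor
      · rintro ⟨u, ⟨v, hv, h | h⟩, hsr⟩
        · exact ⟨v, hv, Or.inl (h ▸ hsr)⟩
        · exact ⟨v, hv, Or.inr (h ▸ hsr)⟩
      · rintro ⟨v, hv, h | h⟩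
        · exact ⟨v + l, ⟨v, hv, Or.inl rfl⟩, h⟩
        · exact ⟨v - l, ⟨v, hv, Or.inr rfl⟩, h⟩

-- the alternating loop splits into two independent folds over the strided runs
theorem loopA_split (rest : List Nat) :
    ∀ (c0 c1 : PySem.Set Int),
      loopA rest true (c0, c1) = (foldU c0 (stride2 (rest.drop 1)), foldU c1 (stride2 rest)) ∧
      loopA rest false (c0, c1) = (foldU c0 (stride2 rest), foldU c1 (stride2 (rest.drop 1))) := by
  induction rest with
  | nil => intro c0 c1; simp [loopA, stride2, foldU]
  | cons l t ih =>
      intro c0 c1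
      have hstr : stride2 (l :: t) = l :: stride2 (t.drop 1) := by
        cases t <;> simp [stride2]
      have hfU : ∀ c, foldU c (stride2 (l :: t)) = foldU (updateA c (l : Int)) (stride2 (t.drop 1)) := by
        intro c; rw [hstr]; rfl
      constructor
      · show loopA t false (c0, updateA c1 (l : Int)) = _
        rw [(ih c0 (updateA c1 (l : Int))).2, hfU]
        simp
      · show loopA t true (updateA c0 (l : Int), c1) = _
        rw [(ih (updateA c0 (l : Int)) c1).1, hfU]
        simp

theorem contains_eq_mem {α : Type} [DecidableEq α] (c : PySem.Set α) (a : α) :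
    PySem.Set.contains c a = decide (a ∈ c) := by
  simp [PySem.Set.contains_eq_listContains]

-- A's answer: both axis sets checked = signed reachability from the seeds
theorem solve_char (s : String) (x y : Int) (f : Nat) (rest : List Nat)
    (h : runsOf s = f :: rest) :
    solve s x y = true ↔ SR (stride2 (rest.drop 1)) (f : Int) x ∧ SR (stride2 rest) 0 y := by
  unfold solve
  rw [h]
  simp only
  rw [(loopA_split rest _ _).1]
  simp only [Bool.and_eq_true, contains_eq_mem, decide_eq_true_eq]
  rw [mem_foldU, mem_foldU]
  simp [PySem.Set.empty]

-- subset sums never exceed the total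
theorem SubS_le (vals : List Nat) (n : Nat) (h : SubS vals n) : n ≤ vals.sum := by
  induction vals generalizing n with
  | nil => simp [SubS] at h; omega
  | cons v t ih =>
      rcases h with h | ⟨hv, h⟩
      · have := ih _ h; simp [List.sum_cons]; omega
      · have := ih _ h; simp [List.sum_cons]; omega

-- signed sums = twice a subset sum minus the total
theorem SR_iff (vals : List Nat) (v w : Int) :
    SR vals v w ↔ ∃ j : Nat, SubS vals j ∧ w = v + 2 * (j : Int) - (vals.sum : Int) := by
  induction vals generalizing v with
  | nil =>
      simp only [SR, SubS, List.sum_nil]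
      constructor
      · intro h; exact ⟨0, rfl, by omega⟩
      · rintro ⟨j, rfl, h⟩; omega
  | cons l t ih =>
      simp only [SR, ih, SubS, List.sum_cons]
      constructor
      · rintro (⟨j, hs, he⟩ | ⟨j, hs, he⟩)
        · refine ⟨j + l, Or.inr ⟨by omega, by simpa using hs⟩, ?_⟩
          push_cast at he ⊢; omega
        · exact ⟨j, Or.inl hs, by push_cast at he ⊢; omega⟩
      · rintro ⟨j, hs | ⟨hl, hs⟩, he⟩
        · exact Or.inr ⟨j, hs, by push_cast at he ⊢; omega⟩
        · refine Or.inl ⟨j - l, hs, ?_⟩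
          push_cast at he ⊢; omega

theorem getD_dpStep (dp : List Bool) (v half j : Nat) (hj : j ≤ half) :
    (dpStep dp v half).getD j false =
      (dp.getD j false || (decide (v ≤ j) && dp.getD (j - v) false)) := by
  unfold dpStep
  rw [List.getD_eq_getElem?_getD, List.getElem?_map, List.getElem?_range (by omega)]
  simp

-- DP invariant: folding dpStep computes 'some subset of vals plus a Q-position'
theorem foldDP (half : Nat) (vals : List Nat) :
    ∀ (dp : List Bool) (Q : Nat → Prop),
      (∀ j, j ≤ half → (dp.getD j false = true ↔ Q j)) →
      ∀ j, j ≤ half →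
        ((vals.foldl (fun dp v => dpStep dp v half) dp).getD j false = true ↔
          ∃ m, m ≤ j ∧ SubS vals m ∧ Q (j - m)) := by
  induction vals with
  | nil =>
      intro dp Q hQ j hj
      simp only [List.foldl_nil]
      rw [hQ j hj]
      constructor
      · intro h; exact ⟨0, by omega, rfl, by simpa using h⟩
      · rintro ⟨m, hm, hm0, h⟩
        simp only [SubS] at hm0; subst hm0; simpa using h
  | cons v t ih =>
      intro dp Q hQ j hj
      simp only [List.foldl_cons]
      rw [ih (dpStep dp v half) (fun j => Q j ∨ (v ≤ j ∧ Q (j - v)))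
        (by
          intro j hj
          rw [getD_dpStep dp v half j hj]
          simp only [Bool.or_eq_true, Bool.and_eq_true, decide_eq_true_eq]
          rw [hQ j hj, hQ (j - v) (by omega)]) j hj]
      constructor
      · rintro ⟨m, hm, hs, hq | ⟨hv, hq⟩⟩
        · exact ⟨m, hm, Or.inl hs, hq⟩
        · refine ⟨m + v, by omega, Or.inr ⟨by omega, by simpa using hs⟩, ?_⟩
          have : j - (m + v) = j - m - v := by omega
          rw [this]; exact hq
      · rintro ⟨m, hm, hs | ⟨hv, hs⟩, hq⟩
        · exact ⟨m, hm, hs, Or.inl hq⟩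
        · refine ⟨m - v, by omega, hs, Or.inr ⟨by omega, ?_⟩⟩
          have : j - (m - v) - v = j - m := by omega
          rw [this]; exact hq

-- initial table: true exactly at index 0
theorem getD_init (half j : Nat) :
    ((true :: List.replicate half false).getD j false = true) ↔ j = 0 := by
  cases j with
  | zero => simp
  | succ k =>
      simp only [List.getD_cons_succ]
      rw [List.getD_eq_getElem?_getD, List.getElem?_replicate]
      rcases Nat.lt_or_ge k half with h | h
      · simp [h]
      · rw [if_neg (by omega)]
        simp

-- Source B's reachable decides signed reachability from 0
theorem reachable_iff (vals : List Nat) (target : Int) :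
    reachable vals target = true ↔ SR vals 0 target := by
  unfold reachable
  simp only
  have hmod : PySem.Int.mod (target + (vals.sum : Int)) 2 =
      (target + (vals.sum : Int)) % 2 := PySem.Int.mod_eq_emod_of_pos (by omega)
  split_ifs with hg
  · simp only [false_iff]
    intro hsr
    obtain ⟨j, hs, he⟩ := (SR_iff vals 0 target).1 hsr
    have hle := SubS_le vals j hs
    rw [hmod] at hg
    rcases hg with h | h | h
    · omega
    · omega
    · apply h; omega
  · push Not at hg
    obtain ⟨h0, h2, hev⟩ := hg
    rw [hmod] at hev
    set t : Int := target + (vals.sum : Int) with ht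
    have hfd : PySem.Int.floordiv t 2 = t / 2 := PySem.Int.floordiv_eq_ediv_of_pos (by omega)
    set half : Nat := (PySem.Int.floordiv t 2).toNat with hhalf
    have h2h : (half : Int) * 2 = t := by
      rw [hhalf, hfd]; omega
    rw [foldDP half vals _ (fun j => j = 0) (fun j hj => getD_init half j) half (le_refl _)]
    rw [SR_iff]
    constructor
    · rintro ⟨m, hm, hs, hq⟩
      have : m = half := by omega
      subst this
      exact ⟨half, hs, by omega⟩
    · rintro ⟨j, hs, he⟩
      have : j = half := by omega
      subst this
      exact ⟨half, le_refl _, hs, by omega⟩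

-- shifting the start of a signed walk shifts the target
theorem SR_shift (vals : List Nat) (v w : Int) : SR vals v w ↔ SR vals 0 (w - v) := by
  rw [SR_iff, SR_iff]
  constructor <;> rintro ⟨j, hs, he⟩ <;> exact ⟨j, hs, by omega⟩

-- ===== VERDICT (by name: the statement is the Claim_ definition above) =====
theorem solve_spec : Claim_equal_solve := by
  intro s x y _
  unfold Spec_solve
  cases hr : runsOf s with
  | nil => unfold solve solve_alt; rw [hr]
  | cons f rest =>
      rw [Bool.eq_iff_iff, solve_char s x y f rest hr]
      unfold solve_alt
      rw [hr]
      simp only [Bool.and_eq_true]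
      rw [reachable_iff, reachable_iff, SR_shift]
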